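-- pv_equiv track=rewrite | github.com/robertoberto/petasan | storage-appliance/usr/lib/python2.7/dist-packages/PetaSAN/core/ceph/ceph_disk.py | get_partition_num
-- ===== SOURCE A (Python) =====
-- def get_partition_num(part_name):
--     part_num = ""
--     count = 0
--     for i in reversed(part_name):
--         if i.isdigit():
--             count += 1
--         else:
--             break
--     if count == 0:
--         return None
--     part_num = part_name[-count:]
--     return part_num
-- ===== SOURCE B (Python) =====
-- import re
--
-- def get_partition_num(part_name):
--     m = re.search(r'\d+\Z', part_name)
--     return m.group() if m else None
-- ===== Notes on version B (the rewrite author's own statement) =====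
-- stated objective: idiomatic
-- what changed: Replaces the reversed-character counting loop and negative-index slice with a single end-anchored regex search (r'\d+\Z') for the trailing digit run.
import Mathlib
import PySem

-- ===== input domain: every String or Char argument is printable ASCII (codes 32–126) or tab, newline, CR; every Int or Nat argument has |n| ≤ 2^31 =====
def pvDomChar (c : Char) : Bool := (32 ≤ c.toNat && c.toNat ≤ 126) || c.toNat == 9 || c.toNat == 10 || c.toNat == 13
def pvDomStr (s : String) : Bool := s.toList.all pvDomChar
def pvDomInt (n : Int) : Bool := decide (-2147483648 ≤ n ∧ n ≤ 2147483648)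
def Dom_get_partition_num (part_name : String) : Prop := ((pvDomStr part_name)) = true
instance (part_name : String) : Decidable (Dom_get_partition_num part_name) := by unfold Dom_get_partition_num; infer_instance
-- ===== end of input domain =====

-- B replaces A's reversed counting loop + negative slice by a single anchored regex
-- search r'\d+\Z' returning the matched trailing digit run (objective: idiomatic).

-- ===== PORT A =====
-- the 'for i in reversed(part_name): if i.isdigit(): count += 1 else: break' loop
def pvCountA : List Char → Nat
  | [] => 0
  | c :: rest => if PySem.Chars.isdigit c then pvCountA rest + 1 else 0

def get_partition_num (part_name : String) : Option String :=
  let count := pvCountA part_name.toList.reverse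
  if count = 0 then none
  else some (PySem.Str.slice part_name (some (-(count : Int))) none)

-- ===== PORT B =====
-- re.search(r'\d+\Z', s): the maximal run of digits at the end of s (exact on the
-- ASCII domain, where \d and str.isdigit both mean '0'-'9'); group() is that run.
def get_partition_num_alt (part_name : String) : Option String :=
  let run := (part_name.toList.reverse.takeWhile PySem.Chars.isdigit).reverse
  if run.isEmpty then none else some (String.ofList run)

-- ===== PRECONDITION & SPEC =====
def Spec_get_partition_num (part_name : String) (out : Option String) : Prop := out = get_partition_num_alt part_name
instance (part_name : String) (out : Option String) : Decidable (Spec_get_partition_num part_name out) := by unfold Spec_get_partition_num; infer_instance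

-- ===== CLAIM (what is proved, stated in full; the proofs are below) =====
def Claim_equal_get_partition_num : Prop := ∀ (part_name : String), Dom_get_partition_num part_name → Spec_get_partition_num part_name (get_partition_num part_name)

-- ===== LEMMAS AND PROOFS =====

-- A's break-loop counts exactly the leading digit run of the reversed list
theorem pvCountA_eq_takeWhile (l : List Char) :
    pvCountA l = (l.takeWhile PySem.Chars.isdigit).length := by
  induction l with
  | nil => rfl
  | cons c rest ih =>
    simp only [pvCountA, List.takeWhile_cons]
    split_ifs with h
    · simp [ih]
    · simp

theorem pv_drop_of_rev_split (xs t d : List Char) (h : xs.reverse = t ++ d) :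
    xs.drop (xs.length - t.length) = t.reverse := by
  have hxs : xs = d.reverse ++ t.reverse := by
    rw [← xs.reverse_reverse, h, List.reverse_append]
  rw [hxs]
  have hn : (d.reverse ++ t.reverse).length - t.length = (d.reverse).length := by
    simp [List.length_append]
  rw [hn, List.drop_left]

theorem pv_drop_eq_takeWhile_rev (xs : List Char) :
    xs.drop (xs.length - (xs.reverse.takeWhile PySem.Chars.isdigit).length)
      = (xs.reverse.takeWhile PySem.Chars.isdigit).reverse :=
  pv_drop_of_rev_split xs _ _
    (List.takeWhile_append_dropWhile (p := PySem.Chars.isdigit) (l := xs.reverse)).symm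

-- ===== VERDICT (by name: the statement is the Claim_ definition above) =====
theorem get_partition_num_spec : Claim_equal_get_partition_num := by
  intro s _
  unfold Spec_get_partition_num get_partition_num get_partition_num_alt
  simp only [pvCountA_eq_takeWhile]
  set t := s.toList.reverse.takeWhile PySem.Chars.isdigit with ht
  by_cases h0 : t.length = 0
  · simp [List.length_eq_zero_iff.mp h0]
  · have hk : 0 < t.length := Nat.pos_of_ne_zero h0
    have hslice : PySem.Str.slice s (some (-(t.length : Int))) none
        = String.ofList t.reverse := by
      apply String.toList_injective
      rw [PySem.Str.toList_slice]
      rw [PySem.Chars.slice_eq_listSlice,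
        PySem.List.slice_from_neg_natCast _ _ hk]
      rw [pv_drop_eq_takeWhile_rev]
      simp [← ht]
    have hne : (t.reverse).isEmpty = false := by
      simp only [List.isEmpty_eq_false_iff, ne_eq, List.reverse_eq_nil_iff]
      intro h; exact h0 (by simp [h])
    simp [h0, hslice, hne]
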